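-- pv_equiv track=rewrite | github.com/VetleVatnem/Git-4-dummies | TDT4110_eksamen_2023_utenspill.py | not_mutual
-- ===== SOURCE A (Python) =====
-- def not_mutual(D):
--     nøkkler = list(D.keys())
--     tuppler = []
--     for i in range(len(nøkkler)):
--         A = nøkkler[i]
--         for j in range(len(D[nøkkler[i]])):
--             B = list(D[nøkkler[i]])[j]
--
--             if B not in nøkkler or B in D[A] and A not in D[B]:
--                 tuppler.append((A,B))
--     return tuppler
-- ===== SOURCE B (Python) =====
-- def not_mutual(D):
--     edges = [(a, b) for a, nbrs in D.items() for b in nbrs]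
--     fwd = sorted(enumerate(edges), key=lambda t: t[1])
--     rev = sorted((b, a) for a, b in edges)
--     keep = [True] * len(edges)
--     j = 0
--     for i, e in fwd:
--         while j < len(rev) and rev[j] < e:
--             j += 1
--         if j < len(rev) and rev[j] == e:
--             keep[i] = False
--     return [e for e, k in zip(edges, keep) if k]
-- ===== Notes on version B (the rewrite author's own statement) =====
-- stated objective: faster
-- what changed: B is a sort-merge anti-join: it flattens the directed-edge list, sorts the indexed edges and the reversed edges, marks every edge whose reverse exists in one coordinated two-pointer sweep over the two sorted lists, and then emits the unmarked edges in original order - no per-edge membership scan (A scans the key list and two neighbour lists for every edge).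
import Mathlib
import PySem

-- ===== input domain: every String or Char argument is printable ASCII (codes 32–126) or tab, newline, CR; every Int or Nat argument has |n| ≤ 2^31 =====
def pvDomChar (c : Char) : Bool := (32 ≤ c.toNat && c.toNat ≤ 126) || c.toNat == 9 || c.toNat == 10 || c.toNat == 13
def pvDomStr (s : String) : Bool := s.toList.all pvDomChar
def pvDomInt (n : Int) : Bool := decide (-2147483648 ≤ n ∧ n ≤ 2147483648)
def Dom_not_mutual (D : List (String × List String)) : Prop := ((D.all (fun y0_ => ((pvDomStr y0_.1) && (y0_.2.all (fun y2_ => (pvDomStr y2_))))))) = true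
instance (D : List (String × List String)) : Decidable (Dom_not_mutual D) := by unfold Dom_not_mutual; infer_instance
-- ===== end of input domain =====

-- B is a sort-merge anti-join: it flattens the edge list, sorts the indexed edges and the
-- reversed edges, and marks mutual edges in one coordinated sweep with a shared pointer —
-- no per-edge membership test; equal return values proved on unique-key dicts.

-- ===== PORT A =====
-- D[k]: first-match association-list lookup (the key is always present where A evaluates it)
def dget (D : List (String × List String)) (k : String) : List String :=
  ((D.find? (fun p => p.1 == k)).map Prod.snd).getD []

def not_mutual (D : List (String × List String)) : List (String × String) :=
  let nøkkler := D.map Prod.fst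
  (PySem.List.pyRange 0 (PySem.List.len nøkkler) 1).foldl (fun tuppler i =>
    let A := PySem.List.pyGetD nøkkler i ""
    (PySem.List.pyRange 0 (PySem.List.len (dget D A)) 1).foldl (fun tuppler j =>
      let B := PySem.List.pyGetD (dget D A) j ""
      if ¬ B ∈ nøkkler ∨ (B ∈ dget D A ∧ ¬ A ∈ dget D B) then tuppler ++ [(A, B)]
      else tuppler) tuppler) []

-- ===== PORT B =====
-- Python's `<` on a pair of strings: lexicographic (first components, then second)
def plt (x y : String × String) : Bool := x.1 < y.1 || (x.1 == y.1 && x.2 < y.2)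

-- the `while j < len(rev) and rev[j] < e: j += 1` loop
def advance (rev : List (String × String)) (e : String × String) (j : Nat) : Nat :=
  if h : j < rev.length then
    (if plt rev[j] e then advance rev e (j + 1) else j)
  else j
termination_by rev.length - j
decreasing_by omega

-- one iteration of `for i, e in fwd: …` (state: the shared pointer j and the keep list)
def mergeStep (rev : List (String × String)) (s : Nat × List Bool)
    (t : Int × (String × String)) : Nat × List Bool :=
  let j := advance rev t.2 s.1
  if h : j < rev.length then
    (if rev[j] == t.2 then (j, PySem.List.pySetD s.2 t.1 false) else (j, s.2))
  else (j, s.2)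

def not_mutual_alt (D : List (String × List String)) : List (String × String) :=
  let edges := D.flatMap (fun p => p.2.map (fun b => (p.1, b)))
  let fwd := PySem.List.sorted2 (PySem.List.enumerate edges 0) (fun t => t.2.1) (fun t => t.2.2)
  let rev := PySem.List.sorted2 (edges.map (fun e => (e.2, e.1))) Prod.fst Prod.snd
  let st := fwd.foldl (mergeStep rev) (0, List.replicate edges.length true)
  ((edges.zip st.2).filter (fun p => p.2)).map Prod.fst

-- ===== PRECONDITION & SPEC =====
-- Pre_ excludes only association lists with duplicate keys: a Python dict cannot have them,
-- so no input the Python A accepts is excluded.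
def Pre_not_mutual (D : List (String × List String)) : Prop := (D.map Prod.fst).Nodup
instance (D : List (String × List String)) : Decidable (Pre_not_mutual D) := by unfold Pre_not_mutual; infer_instance
def pvWitness_not_mutual : (List (String × List String)) := [("a", ["b", "c"]), ("b", ["a"]), ("c", [])]

def Spec_not_mutual (D : List (String × List String)) (out : List (String × String)) : Prop := out = not_mutual_alt D
instance (D : List (String × List String)) (out : List (String × String)) : Decidable (Spec_not_mutual D out) := by unfold Spec_not_mutual; infer_instance

-- ===== CLAIM (what is proved, stated in full; the proofs are below) =====
def Claim_equal_not_mutual : Prop := ∀ (D : List (String × List String)), Dom_not_mutual D → Pre_not_mutual D → Spec_not_mutual D (not_mutual D)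

-- ===== LEMMAS AND PROOFS =====

-- the flattened directed-edge list
def edgesOf (D : List (String × List String)) : List (String × String) :=
  D.flatMap (fun p => p.2.map (fun b => (p.1, b)))

theorem mem_edgesOf (D : List (String × List String)) (x y : String) :
    (x, y) ∈ edgesOf D ↔ ∃ l, (x, l) ∈ D ∧ y ∈ l := by
  simp only [edgesOf, List.mem_flatMap, List.mem_map]
  constructor
  · rintro ⟨p, hp, b, hb, he⟩
    have hx : p.1 = x := congrArg Prod.fst he
    have hy : b = y := congrArg Prod.snd he
    exact ⟨p.2, by rw [← hx]; simpa using hp, hy ▸ hb⟩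
  · rintro ⟨l, hl, hy⟩
    exact ⟨(x, l), hl, y, hy, rfl⟩

theorem dget_eq_of_mem {D : List (String × List String)} (hnd : (D.map Prod.fst).Nodup)
    {a : String} {l : List String} (h : (a, l) ∈ D) : dget D a = l := by
  induction D with
  | nil => simp at h
  | cons p t ih =>
    simp only [List.map_cons, List.nodup_cons] at hnd
    rcases List.mem_cons.mp h with h | h
    · simp [dget, ← h]
    · have hne : p.1 ≠ a := by
        intro he
        exact hnd.1 (he ▸ List.mem_map.mpr ⟨(a, l), h, rfl⟩)
      simpa [dget, beq_iff_eq, hne] using ih hnd.2 h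

theorem mem_keys_iff (D : List (String × List String)) (a : String) :
    a ∈ D.map Prod.fst ↔ ∃ l, (a, l) ∈ D := by
  simp only [List.mem_map]
  constructor
  · rintro ⟨p, hp, rfl⟩; exact ⟨p.2, hp⟩
  · rintro ⟨l, hl⟩; exact ⟨(a, l), hl, rfl⟩

-- the reciprocity test: (b,a) is an edge iff b is a key and a is in D[b]
theorem edge_iff (D : List (String × List String)) (hnd : (D.map Prod.fst).Nodup)
    (a b : String) : (b, a) ∈ edgesOf D ↔ b ∈ D.map Prod.fst ∧ a ∈ dget D b := by
  rw [mem_edgesOf, mem_keys_iff]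
  constructor
  · rintro ⟨l, hl, ha⟩
    exact ⟨⟨l, hl⟩, (dget_eq_of_mem hnd hl) ▸ ha⟩
  · rintro ⟨⟨l, hl⟩, ha⟩
    exact ⟨l, hl, (dget_eq_of_mem hnd hl) ▸ ha⟩

-- A's index loops are folds over the key list and the neighbour lists
theorem not_mutual_eq_foldl (D : List (String × List String)) :
    not_mutual D = (D.map Prod.fst).foldl (fun tuppler A =>
      (dget D A).foldl (fun tuppler B =>
        if ¬ B ∈ D.map Prod.fst ∨ (B ∈ dget D A ∧ ¬ A ∈ dget D B) then tuppler ++ [(A, B)]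
        else tuppler) tuppler) [] := by
  show (PySem.List.pyRange 0 (PySem.List.len (D.map Prod.fst)) 1).foldl (fun tuppler i =>
      (PySem.List.pyRange 0 (PySem.List.len (dget D (PySem.List.pyGetD (D.map Prod.fst) i ""))) 1).foldl
        (fun tuppler j =>
          if ¬ (PySem.List.pyGetD (dget D (PySem.List.pyGetD (D.map Prod.fst) i "")) j "") ∈ D.map Prod.fst
              ∨ ((PySem.List.pyGetD (dget D (PySem.List.pyGetD (D.map Prod.fst) i "")) j "") ∈ dget D (PySem.List.pyGetD (D.map Prod.fst) i "")
                  ∧ ¬ (PySem.List.pyGetD (D.map Prod.fst) i "") ∈ dget D (PySem.List.pyGetD (dget D (PySem.List.pyGetD (D.map Prod.fst) i "")) j ""))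
          then tuppler ++ [((PySem.List.pyGetD (D.map Prod.fst) i ""), (PySem.List.pyGetD (dget D (PySem.List.pyGetD (D.map Prod.fst) i "")) j ""))]
          else tuppler) tuppler) [] = _
  rw [PySem.List.foldl_pyRange_zero_pyGetD (D.map Prod.fst) ""
      (fun tuppler A =>
        (PySem.List.pyRange 0 (PySem.List.len (dget D A)) 1).foldl (fun tuppler j =>
          if ¬ (PySem.List.pyGetD (dget D A) j "") ∈ D.map Prod.fst
              ∨ ((PySem.List.pyGetD (dget D A) j "") ∈ dget D A ∧ ¬ A ∈ dget D (PySem.List.pyGetD (dget D A) j ""))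
          then tuppler ++ [(A, PySem.List.pyGetD (dget D A) j "")] else tuppler) tuppler) []]
  refine PySem.List.foldl_congr_mem _ _ _ _ (fun acc A _ => ?_)
  exact PySem.List.foldl_pyRange_zero_pyGetD (dget D A) ""
    (fun tuppler B =>
      if ¬ B ∈ D.map Prod.fst ∨ (B ∈ dget D A ∧ ¬ A ∈ dget D B) then tuppler ++ [(A, B)]
      else tuppler) acc

-- pushing a filter through the flattened edge list
theorem filter_edgesOf (D : List (String × List String)) (q : String × String → Bool) :
    (edgesOf D).filter q
      = D.flatMap (fun p => ((p.2.filter (fun b => q (p.1, b))).map (fun b => (p.1, b)))) := by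
  unfold edgesOf
  simp only [List.filter_flatMap, List.filter_map]
  rfl

-- A in canonical form: keep an edge iff its reverse is not an edge
theorem not_mutual_eq_filter (D : List (String × List String))
    (hnd : (D.map Prod.fst).Nodup) :
    not_mutual D = (edgesOf D).filter (fun e => !decide ((e.2, e.1) ∈ edgesOf D)) := by
  rw [not_mutual_eq_foldl, List.foldl_map,
    filter_edgesOf D (fun e => !decide ((e.2, e.1) ∈ edgesOf D)),
    show D.flatMap (fun p => ((p.2.filter (fun b => !decide ((b, p.1) ∈ edgesOf D))).map
        (fun b => (p.1, b))))
      = [] ++ D.flatMap (fun p => ((p.2.filter (fun b => !decide ((b, p.1) ∈ edgesOf D))).map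
        (fun b => (p.1, b)))) from (List.nil_append _).symm,
    ← PySem.List.foldl_append_eq_flatMap
      (fun p => ((p.2.filter (fun b => !decide ((b, p.1) ∈ edgesOf D))).map
        (fun b => (p.1, b)))) D []]
  refine PySem.List.foldl_congr_mem D _ _ [] (fun acc p hp => ?_)
  have hd : dget D p.1 = p.2 := dget_eq_of_mem hnd hp
  simp only [hd]
  rw [PySem.List.foldl_append_ite
    (fun B => ¬ B ∈ D.map Prod.fst ∨ (B ∈ p.2 ∧ ¬ p.1 ∈ dget D B)) (fun B => (p.1, B)) p.2 acc]
  refine congrArg _ (congrArg _ (List.filter_congr fun B hB => ?_))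
  have hiff : (¬ B ∈ D.map Prod.fst ∨ (B ∈ p.2 ∧ ¬ p.1 ∈ dget D B))
      ↔ ¬ ((B, p.1) ∈ edgesOf D) := by
    rw [edge_iff D hnd p.1 B]
    constructor
    · rintro (h | ⟨_, h⟩) ⟨hk, ha⟩
      exacts [h hk, h ha]
    · intro h
      by_cases hk : B ∈ D.map Prod.fst
      · exact Or.inr ⟨hB, fun ha => h ⟨hk, ha⟩⟩
      · exact Or.inl hk
  have hd2 : decide (¬ B ∈ D.map Prod.fst ∨ (B ∈ p.2 ∧ ¬ p.1 ∈ dget D B))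
      = !decide ((B, p.1) ∈ edgesOf D) := by
    have h1 : decide (¬ B ∈ D.map Prod.fst ∨ (B ∈ p.2 ∧ ¬ p.1 ∈ dget D B))
        = decide (¬ ((B, p.1) ∈ edgesOf D)) := decide_eq_decide.mpr hiff
    rw [h1]
    simp
  exact hd2

-- ===== B-side lemmas =====

-- the boolean pair-comparison is the strict lexicographic order
theorem plt_iff (x y : String × String) : plt x y = true ↔ toLex x < toLex y := by
  simp [plt, Prod.Lex.toLex_lt_toLex, beq_iff_eq]

-- insertion sort with the comparison `decide (key a < key b)` yields a key-sorted list
theorem pairwise_foldl_insertBy {α κ : Type} [LinearOrder κ] (key : α → κ) :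
    ∀ (xs acc : List α), acc.Pairwise (fun a b => key a ≤ key b) →
    (xs.foldl (fun acc x => PySem.List.insertBy (fun a b => decide (key a < key b)) x acc)
        acc).Pairwise (fun a b => key a ≤ key b) := by
  intro xs
  induction xs with
  | nil => exact fun acc h => h
  | cons x t ih =>
    intro acc h
    exact ih _ (PySem.List.insertBy_pairwise_le key x acc h)

-- sorted2's internal comparison is the strict lexicographic order on the key pair
theorem sorted2_pairwise {α : Type} (xs : List α) (k1 k2 : α → String) :
    (PySem.List.sorted2 xs k1 k2).Pairwise
      (fun a b => toLex (k1 a, k2 a) ≤ toLex (k1 b, k2 b)) := by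
  have hbe : (fun a b => decide (k1 a < k1 b) || (!decide (k1 b < k1 a) && decide (k2 a < k2 b)))
      = (fun a b => decide ((fun a => toLex (k1 a, k2 a)) a < (fun a => toLex (k1 a, k2 a)) b)) := by
    funext a b
    rcases lt_trichotomy (k1 a) (k1 b) with h | h | h
    · simp [Prod.Lex.toLex_lt_toLex, h]
    · simp [Prod.Lex.toLex_lt_toLex, h]
    · simp [Prod.Lex.toLex_lt_toLex, h, lt_asymm h, (ne_of_gt h)]
  have hs : PySem.List.sorted2 xs k1 k2
      = xs.foldl (fun acc x => PySem.List.insertBy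
          (fun a b => decide ((fun a => toLex (k1 a, k2 a)) a < (fun a => toLex (k1 a, k2 a)) b)) x acc) [] := by
    simp only [PySem.List.sorted2]
    rw [if_neg (by simp)]
    rw [hbe]
  rw [hs]
  exact pairwise_foldl_insertBy (fun a => toLex (k1 a, k2 a)) xs [] (by simp)

-- specification of the pointer-advancing while loop
theorem advance_spec (rev : List (String × String)) (e : String × String) (j : Nat)
    (hj : j ≤ rev.length) :
    j ≤ advance rev e j ∧ advance rev e j ≤ rev.length ∧
    (∀ k, j ≤ k → (hk : k < advance rev e j) → ∀ (h : k < rev.length), toLex rev[k] < toLex e) ∧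
    (∀ (h : advance rev e j < rev.length), ¬ toLex rev[advance rev e j] < toLex e) := by
  induction hn : rev.length - j generalizing j with
  | zero =>
    have hje : j = rev.length := by omega
    rw [advance, dif_neg (by omega)]
    refine ⟨le_refl _, hj, fun k hk1 hk2 _ => absurd hk2 (by omega), fun h => absurd h (by omega)⟩
  | succ n ih =>
    have hjl : j < rev.length := by omega
    rw [advance, dif_pos hjl]
    by_cases hp : plt rev[j] e
    · rw [if_pos hp]
      obtain ⟨h1, h2, h3, h4⟩ := ih (j + 1) (by omega) (by omega)
      refine ⟨by omega, h2, ?_, h4⟩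
      intro k hk1 hk2 h
      rcases Nat.eq_or_lt_of_le hk1 with rfl | hlt
      · exact (plt_iff _ _).mp hp
      · exact h3 k hlt hk2 h
    · rw [if_neg hp]
      refine ⟨le_refl _, hj, fun k hk1 hk2 _ => absurd hk2 (by omega), fun _ hc => ?_⟩
      exact hp ((plt_iff _ _).mpr hc)

-- the merge loop computes, per edge, exactly a membership test against the reversed edges
theorem merge_fold (rev : List (String × String)) :
    ∀ (l : List (Int × (String × String))) (j : Nat) (keep : List Bool),
    rev.Pairwise (fun a b => toLex a ≤ toLex b) →
    l.Pairwise (fun p q => toLex p.2 ≤ toLex q.2) →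
    j ≤ rev.length →
    (∀ p ∈ l, ∀ k, (hk : k < j) → ∀ (h : k < rev.length), toLex rev[k] < toLex p.2) →
    (l.foldl (mergeStep rev) (j, keep)).2 =
      l.foldl (fun kp p => if p.2 ∈ rev then PySem.List.pySetD kp p.1 false else kp) keep := by
  intro l
  induction l with
  | nil => intro j keep _ _ _ _; rfl
  | cons p rest ih =>
    intro j keep hsorted hpair hj hinv
    obtain ⟨hle, hlen, hmid, hstop⟩ := advance_spec rev p.2 j hj
    have hall : ∀ k, k < advance rev p.2 j → ∀ (h : k < rev.length), toLex rev[k] < toLex p.2 := by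
      intro k hk h
      by_cases hkj : k < j
      · exact hinv p List.mem_cons_self k hkj h
      · exact hmid k (by omega) hk h
    have hstep : mergeStep rev (j, keep) p
        = (advance rev p.2 j, if p.2 ∈ rev then PySem.List.pySetD keep p.1 false else keep) := by
      unfold mergeStep
      by_cases h : advance rev p.2 j < rev.length
      · by_cases he : rev[advance rev p.2 j] == p.2
        · have hmem : p.2 ∈ rev := beq_iff_eq.mp he ▸ List.getElem_mem h
          simp [h, he, hmem]
        · have hmem : ¬ p.2 ∈ rev := by
            intro hm
            obtain ⟨m, hmlt, hme⟩ := List.getElem_of_mem hm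
            have hmge : advance rev p.2 j ≤ m := by
              by_contra hlt
              have hlt' : m < advance rev p.2 j := by omega
              have hcon := hall m hlt' hmlt
              rw [hme] at hcon
              exact lt_irrefl _ hcon
            have hle2 : toLex rev[advance rev p.2 j] ≤ toLex rev[m] := by
              rcases Nat.eq_or_lt_of_le hmge with hq | hlt
              · subst hq; exact le_refl _
              · exact List.pairwise_iff_getElem.mp hsorted _ m h hmlt hlt
            rw [hme] at hle2
            have heq : toLex rev[advance rev p.2 j] = toLex p.2 :=
              le_antisymm hle2 (not_lt.mp (hstop h))
            exact he (beq_iff_eq.mpr (toLex_inj.mp heq))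
          simp [h, he, hmem]
      · have hmem : ¬ p.2 ∈ rev := by
          intro hm
          obtain ⟨m, hmlt, hme⟩ := List.getElem_of_mem hm
          have hcon := hall m (by omega) hmlt
          rw [hme] at hcon
          exact lt_irrefl _ hcon
        simp [h, hmem]
    simp only [List.foldl_cons, hstep]
    refine ih (advance rev p.2 j) _ hsorted (List.Pairwise.of_cons hpair) hlen ?_
    intro q hq k hk h
    have hpq : toLex p.2 ≤ toLex q.2 := (List.pairwise_cons.mp hpair).1 q hq
    exact lt_of_lt_of_le (hall k hk h) hpq

-- the pure marking fold over enumerate computes a pointwise map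
theorem mark_enum (rev : List (String × String)) :
    ∀ (E : List (String × String)) (keep1 keep2 : List Bool), keep2.length = E.length →
    (PySem.List.enumerate E (keep1.length : Int)).foldl
        (fun kp p => if p.2 ∈ rev then PySem.List.pySetD kp p.1 false else kp) (keep1 ++ keep2) =
      keep1 ++ (E.zip keep2).map (fun q => if q.1 ∈ rev then false else q.2) := by
  intro E
  induction E with
  | nil =>
    intro keep1 keep2 hl
    have : keep2 = [] := List.length_eq_zero_iff.mp hl
    subst this
    simp [PySem.List.enumerate]
  | cons x t ih =>
    intro keep1 keep2 hl
    cases keep2 with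
    | nil => simp at hl
    | cons b t2 =>
      have hset : (if x ∈ rev then PySem.List.pySetD (keep1 ++ b :: t2) (keep1.length : Int) false
            else (keep1 ++ b :: t2))
          = (keep1 ++ [if x ∈ rev then false else b]) ++ t2 := by
        by_cases h : x ∈ rev
        · simp [h, PySem.List.pySetD_natCast, List.set_append_right keep1.length false (le_refl _)]
        · simp [h]
      have hlen1 : (keep1.length : Int) + 1 = ((keep1 ++ [if x ∈ rev then false else b]).length : Int) := by
        simp
      simp only [PySem.List.enumerate, List.foldl_cons, hset]
      rw [hlen1, ih (keep1 ++ [if x ∈ rev then false else b]) t2 (by simpa using hl)]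
      simp

theorem zip_filter_map {α : Type} (E : List α) (g : α → Bool) :
    ((E.zip (E.map g)).filter (fun p => p.2)).map Prod.fst = E.filter g := by
  induction E with
  | nil => rfl
  | cons x t ih => by_cases h : g x <;> simp [h, ih]

theorem zip_replicate_mark (rev : List (String × String)) :
    ∀ (E : List (String × String)),
    (E.zip (List.replicate E.length true)).map (fun q => if q.1 ∈ rev then false else q.2)
      = E.map (fun e => !decide (e ∈ rev)) := by
  intro E
  induction E with
  | nil => rfl
  | cons x t ih =>
    simp only [List.replicate_succ, List.zip_cons_cons, List.map_cons, ih, List.length_cons]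
    by_cases h : x ∈ rev <;> simp [h]

-- B in the same canonical form
theorem not_mutual_alt_eq_filter (D : List (String × List String)) :
    not_mutual_alt D = (edgesOf D).filter (fun e => !decide ((e.2, e.1) ∈ edgesOf D)) := by
  have hE : D.flatMap (fun p => p.2.map (fun b => (p.1, b))) = edgesOf D := rfl
  simp only [not_mutual_alt, hE]
  set E := edgesOf D with hE2
  set revS := PySem.List.sorted2 (E.map (fun e => (e.2, e.1))) Prod.fst Prod.snd with hR
  set fwd := PySem.List.sorted2 (PySem.List.enumerate E 0) (fun t => t.2.1) (fun t => t.2.2) with hF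
  have hrevSorted : revS.Pairwise (fun a b => toLex a ≤ toLex b) := by
    have h := sorted2_pairwise (E.map (fun e => (e.2, e.1))) Prod.fst Prod.snd
    exact h.imp (fun hab => by simpa using hab)
  have hfwdPair : fwd.Pairwise (fun p q => toLex p.2 ≤ toLex q.2) := by
    have h := sorted2_pairwise (PySem.List.enumerate E 0) (fun t => t.2.1) (fun t => t.2.2)
    exact h.imp (fun hab => by simpa using hab)
  have hmerge := merge_fold revS fwd 0 (List.replicate E.length true) hrevSorted hfwdPair
    (Nat.zero_le _) (by intro p hp k hk; exact absurd hk (Nat.not_lt_zero k))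
  rw [hmerge]
  have hperm : fwd.Perm (PySem.List.enumerate E 0) := PySem.List.sorted2_perm _ _ _ _
  have hcomm : fwd.foldl
      (fun kp p => if p.2 ∈ revS then PySem.List.pySetD kp p.1 false else kp)
      (List.replicate E.length true)
      = (PySem.List.enumerate E 0).foldl
        (fun kp p => if p.2 ∈ revS then PySem.List.pySetD kp p.1 false else kp)
        (List.replicate E.length true) := by
    refine List.Perm.foldl_eq' hperm ?_ _
    intro x hx y hy z
    obtain ⟨kx, hkx, hxe⟩ := (PySem.List.mem_enumerate_iff E 0 x).mp (hperm.subset hx)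
    obtain ⟨ky, hky, hye⟩ := (PySem.List.mem_enumerate_iff E 0 y).mp (hperm.subset hy)
    by_cases cx : x.2 ∈ revS <;> by_cases cy : y.2 ∈ revS
    · simp only [if_pos cx, if_pos cy]
      have hx1 : x.1 = (kx : Int) := by rw [hxe]; simp
      have hy1 : y.1 = (ky : Int) := by rw [hye]; simp
      rw [hx1, hy1]
      simp only [PySem.List.pySetD_natCast]
      by_cases hk : kx = ky
      · subst hk; rfl
      · exact List.set_comm _ _ hk
    · simp only [if_pos cx, if_neg cy]
    · simp only [if_neg cx, if_pos cy]
    · simp only [if_neg cx, if_neg cy]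
  rw [hcomm]
  have hmark := mark_enum revS E [] (List.replicate E.length true) (by simp)
  simp only [List.length_nil, Nat.cast_zero, List.nil_append] at hmark
  rw [hmark, zip_replicate_mark revS E, zip_filter_map E (fun e => !decide (e ∈ revS))]
  refine List.filter_congr fun e he => ?_
  have hmem : e ∈ revS ↔ (e.2, e.1) ∈ E := by
    rw [(PySem.List.sorted2_perm (E.map (fun e => (e.2, e.1))) Prod.fst Prod.snd false).mem_iff]
    simp only [List.mem_map]
    constructor
    · rintro ⟨x, hx, hxe⟩
      have h1 : x.2 = e.1 := congrArg Prod.fst hxe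
      have h2 : x.1 = e.2 := congrArg Prod.snd hxe
      rw [← h1, ← h2]
      simpa using hx
    · intro h
      exact ⟨(e.2, e.1), h, by simp⟩
  simp [hmem]

-- ===== VERDICT (by name: the statement is the Claim_ definition above) =====
theorem not_mutual_spec : Claim_equal_not_mutual := by
  intro D _hdom hnd
  unfold Spec_not_mutual
  rw [not_mutual_eq_filter D hnd, not_mutual_alt_eq_filter D]
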